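-- pv_equiv track=rewrite | github.com/Hyun010/algorithm | 프로그래머스/1/12977. 소수 만들기/소수 만들기.py | solution
-- ===== SOURCE A (Python) =====
-- def is_prime_number(x):
--     # 2부터 (x - 1)까지의 모든 수를 확인하며
--     for i in range(2, x):
--         # x가 해당 수로 나누어떨어진다면
--         if x % i == 0:
--             return False # 소수 아님
--     return True
--
-- def solution(nums):
--     answer = 0
--     all_list=[] #만들 수 있는 전체 리스트
--     #만들 수 있는 전체 리스트 반복문(개수가 50개 이하라서 3중 포문 가능)
--     for i in range(len(nums)-2):
--         for j in range(i+1,len(nums)-1):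
--             for k in range(j+1,len(nums)):
--                 all_list.append(nums[i]+nums[j]+nums[k])
--     for i in all_list:
--         if is_prime_number(i):
--             answer+=1
--     return answer
-- ===== SOURCE B (Python) =====
-- def _is_prime(x):
--     i = 2
--     while i * i <= x:
--         if x % i == 0:
--             return False
--         i += 1
--     return True
--
-- def _comb_sums(xs, r):
--     # sums of all r-element combinations, in combination order
--     if r == 0:
--         return [0]
--     if not xs:
--         return []
--     return [xs[0] + s for s in _comb_sums(xs[1:], r - 1)] + _comb_sums(xs[1:], r)
--
-- def solution(nums):
--     return sum(1 for s in _comb_sums(nums, 3) if _is_prime(s))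
-- ===== Notes on version B (the rewrite author's own statement) =====
-- stated objective: alternative
-- what changed: Per-sum trial division over all of 2..x-1 is replaced by trial division only up to sqrt(x), and the fixed triple index loop building an intermediate list is replaced by a recursive Pascal-style r-combination sum generator counted in one pass.
import Mathlib
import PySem

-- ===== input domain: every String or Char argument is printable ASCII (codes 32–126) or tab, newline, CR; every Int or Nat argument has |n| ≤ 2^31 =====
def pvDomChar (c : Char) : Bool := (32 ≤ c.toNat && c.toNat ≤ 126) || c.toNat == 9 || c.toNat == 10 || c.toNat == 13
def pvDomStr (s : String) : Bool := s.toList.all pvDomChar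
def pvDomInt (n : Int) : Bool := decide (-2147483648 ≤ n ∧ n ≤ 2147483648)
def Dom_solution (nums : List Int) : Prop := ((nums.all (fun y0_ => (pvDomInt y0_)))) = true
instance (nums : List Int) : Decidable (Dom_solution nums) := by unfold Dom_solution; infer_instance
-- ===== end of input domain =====

-- B replaces A's per-sum trial division over all of 2..x-1 by trial division up to sqrt(x),
-- and the triple index loop by a recursive combination-sum generator counted in one pass (objective: alternative).

-- ===== PORT A =====
-- loop 'for i in range(2, x): if x % i == 0: return False / return True' (early return = recursion)
def isPrimeALoop (x i : Int) : Bool :=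
  if i < x then
    if PySem.Int.mod x i == 0 then false else isPrimeALoop x (i + 1)
  else true
termination_by (x - i).toNat
decreasing_by omega

def is_prime_number (x : Int) : Bool := isPrimeALoop x 2

def solution (nums : List Int) : Int :=
  let n : Int := (nums.length : Int)
  let allList : List Int :=
    (PySem.List.pyRange 0 (n - 2)).foldl (fun acc i =>
      (PySem.List.pyRange (i + 1) (n - 1)).foldl (fun acc j =>
        (PySem.List.pyRange (j + 1) n).foldl (fun acc k =>
          acc ++ [PySem.List.pyGetD nums i 0 + PySem.List.pyGetD nums j 0 +
                  PySem.List.pyGetD nums k 0]) acc) acc) []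
  allList.foldl (fun a x => if is_prime_number x then a + 1 else a) 0

-- ===== PORT B =====
-- 'while i * i <= x: if x % i == 0: return False; i += 1 / return True'
def primeLoop (x i : Int) : Bool :=
  if h : i * i ≤ x then
    if PySem.Int.mod x i == 0 then false else primeLoop x (i + 1)
  else true
termination_by (x + 1 - i).toNat
decreasing_by
  have h2 : 0 ≤ i * (i - 1) := by
    by_cases hi : 1 ≤ i
    · exact mul_nonneg (by omega) (by omega)
    · have := mul_nonneg (a := -i) (b := 1 - i) (by omega) (by omega)
      nlinarith
  have hix : i ≤ x := by nlinarith
  omega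

def _is_prime (x : Int) : Bool := primeLoop x 2

-- '_comb_sums(xs, r)' from Source B: recursion on the list, Pascal-style
def combSums : List Int → Nat → List Int
  | _, 0 => [0]
  | [], _ + 1 => []
  | x :: t, r + 1 => (combSums t r).map (fun s => x + s) ++ combSums t (r + 1)

-- 'sum(1 for s in _comb_sums(nums, 3) if _is_prime(s))'
def solution_alt (nums : List Int) : Int :=
  ((combSums nums 3).countP _is_prime : Int)

-- ===== PRECONDITION & SPEC =====
def Spec_solution (nums : List Int) (out : Int) : Prop := out = solution_alt nums
instance (nums : List Int) (out : Int) : Decidable (Spec_solution nums out) := by unfold Spec_solution; infer_instance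

-- ===== CLAIM (what is proved, stated in full; the proofs are below) =====
def Claim_equal_solution : Prop := ∀ (nums : List Int), Dom_solution nums → Spec_solution nums (solution nums)

-- ===== LEMMAS AND PROOFS =====

-- ---- primality equivalence ----

theorem isPrimeALoop_iff (x i : Int) :
    isPrimeALoop x i = true ↔ ∀ d : Int, i ≤ d → d < x → ¬ (d ∣ x) := by
  induction i using isPrimeALoop.induct x with
  | case1 i h hmod =>
    rw [isPrimeALoop, if_pos h, if_pos hmod]
    simp only [Bool.false_eq_true, false_iff]
    intro hall
    exact hall i le_rfl h ((PySem.Int.mod_eq_zero_iff_dvd x i).mp (by simpa using hmod))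
  | case2 i h hmod ih =>
    rw [isPrimeALoop, if_pos h, if_neg (by simpa using hmod)]
    rw [ih]
    constructor
    · intro hall d hd hdx
      rcases eq_or_lt_of_le hd with rfl | hlt
      · intro hdvd
        have hm0 : PySem.Int.mod x i = 0 := (PySem.Int.mod_eq_zero_iff_dvd x i).mpr hdvd
        simp [hm0] at hmod
      · exact hall d (by omega) hdx
    · intro hall d hd hdx
      exact hall d (by omega) hdx
  | case3 i h =>
    rw [isPrimeALoop, if_neg h]
    simp only [true_iff]
    intro d hd hdx
    omega

theorem isPrimeA_iff (x : Int) :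
    is_prime_number x = true ↔ ∀ i : Int, 2 ≤ i → i < x → ¬ (i ∣ x) := by
  unfold is_prime_number
  exact isPrimeALoop_iff x 2

theorem primeLoop_iff (x i : Int) :
    1 ≤ i → (primeLoop x i = true ↔ ∀ d : Int, i ≤ d → d * d ≤ x → ¬ (d ∣ x)) := by
  induction i using primeLoop.induct x with
  | case1 i h hmod =>
    intro hi
    rw [primeLoop, dif_pos h, if_pos hmod]
    simp only [Bool.false_eq_true, false_iff]
    intro hall
    exact hall i le_rfl h ((PySem.Int.mod_eq_zero_iff_dvd x i).mp (by simpa using hmod))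
  | case2 i h hmod ih =>
    intro hi
    rw [primeLoop, dif_pos h, if_neg (by simpa using hmod)]
    rw [ih (by omega)]
    constructor
    · intro hall d hd hdx
      rcases eq_or_lt_of_le hd with rfl | hlt
      · intro hdvd
        have hm0 : PySem.Int.mod x i = 0 := (PySem.Int.mod_eq_zero_iff_dvd x i).mpr hdvd
        simp [hm0] at hmod
      · exact hall d (by omega) hdx
    · intro hall d hd hdx
      exact hall d (by omega) hdx
  | case3 i h =>
    intro hi
    rw [primeLoop, dif_neg h]
    simp only [true_iff]
    intro d hd hdx
    exact absurd hdx (by have : i * i ≤ d * d := mul_le_mul hd hd (by omega) (by omega); omega)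

theorem prime_eq (x : Int) : is_prime_number x = _is_prime x := by
  unfold _is_prime
  rw [Bool.eq_iff_iff, isPrimeA_iff, primeLoop_iff x 2 (by omega)]
  constructor
  · intro h d h2 hdx hdvd
    have hlt : d < x := by nlinarith
    exact h d h2 hlt hdvd
  · intro h i h2 hix hdvd
    obtain ⟨e, he⟩ := hdvd
    have hx2 : 2 < x := by omega
    have he0 : 0 < e := by nlinarith
    have he2 : 2 ≤ e := by
      rcases lt_or_ge e 2 with h1 | h1
      · exfalso; interval_cases e; omega
      · exact h1
    have hdvd' : (min i e) ∣ x := by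
      rcases min_cases i e with ⟨h1, _⟩ | ⟨h1, _⟩
      all_goals rw [h1]
      · exact ⟨e, he⟩
      · exact ⟨i, by linarith [he, mul_comm i e]⟩
    have hdd : min i e * min i e ≤ x := by
      calc min i e * min i e ≤ i * e :=
            mul_le_mul (min_le_left i e) (min_le_right i e) (by omega) (by omega)
        _ = x := he.symm
    exact h (min i e) (by omega) hdd hdvd'

-- ---- list-shape equivalence ----

def A2 (xs : List Int) : List Int :=
  (PySem.List.pyRange 0 ((xs.length : Int) - 1)).flatMap (fun j =>
    (PySem.List.pyRange (j + 1) (xs.length : Int)).map (fun k =>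
      PySem.List.pyGetD xs j 0 + PySem.List.pyGetD xs k 0))

def A3 (xs : List Int) : List Int :=
  (PySem.List.pyRange 0 ((xs.length : Int) - 2)).flatMap (fun i =>
    (PySem.List.pyRange (i + 1) ((xs.length : Int) - 1)).flatMap (fun j =>
      (PySem.List.pyRange (j + 1) (xs.length : Int)).map (fun k =>
        PySem.List.pyGetD xs i 0 + PySem.List.pyGetD xs j 0 + PySem.List.pyGetD xs k 0)))

theorem pyRange_shift (a b : Int) :
    PySem.List.pyRange (a + 1) (b + 1) = (PySem.List.pyRange a b).map (· + 1) := by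
  rw [PySem.List.pyRange_one, PySem.List.pyRange_one, List.map_map]
  have : b + 1 - (a + 1) = b - a := by ring
  rw [this]
  exact List.map_congr_left (fun k _ => by simp; ring)

theorem map_shift (a b : Int) (g : Int → Int) :
    (PySem.List.pyRange (a + 1) (b + 1)).map g
      = (PySem.List.pyRange a b).map (fun i => g (i + 1)) := by
  rw [pyRange_shift, List.map_map]; rfl

theorem flatMap_shift (a b : Int) (g : Int → List Int) :
    (PySem.List.pyRange (a + 1) (b + 1)).flatMap g
      = (PySem.List.pyRange a b).flatMap (fun i => g (i + 1)) := by
  rw [pyRange_shift, List.flatMap_map]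

theorem pyGetD_cons_succ (x : Int) (t : List Int) (i : Int) (hi : 0 ≤ i) :
    PySem.List.pyGetD (x :: t) (i + 1) 0 = PySem.List.pyGetD t i 0 := by
  rw [PySem.List.pyGetD_of_nonneg _ _ (by omega), PySem.List.pyGetD_of_nonneg _ _ hi]
  have : (i + 1).toNat = i.toNat + 1 := by omega
  rw [this]
  rfl

theorem combSums_one (t : List Int) : combSums t 1 = t := by
  induction t with
  | nil => rfl
  | cons x t ih => simp [combSums, ih]

theorem combSums_short (xs : List Int) (r : Nat) (h : xs.length < r) : combSums xs r = [] := by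
  induction xs generalizing r with
  | nil => cases r with
    | zero => simp at h
    | succ r => rfl
  | cons x t ih =>
    cases r with
    | zero => simp at h
    | succ r =>
      simp only [combSums]
      rw [ih r (by simpa using h), ih (r + 1) (by simp at h ⊢; omega)]
      rfl

theorem A2_eq (xs : List Int) : A2 xs = combSums xs 2 := by
  induction xs with
  | nil => simp [A2, combSums]
  | cons x t ih =>
    unfold A2
    rcases Nat.eq_zero_or_pos t.length with hm | hm
    · have ht : t = [] := List.eq_nil_of_length_eq_zero hm
      subst ht
      simp [combSums]
    · have hlen : ((x :: t).length : Int) = (t.length : Int) + 1 := by simp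
      rw [hlen]
      have h0 : (0 : Int) < (t.length : Int) + 1 - 1 := by omega
      rw [PySem.List.pyRange_one_cons h0, List.flatMap_cons]
      have head :
          (PySem.List.pyRange (0 + 1) ((t.length : Int) + 1)).map (fun k =>
            PySem.List.pyGetD (x :: t) 0 0 + PySem.List.pyGetD (x :: t) k 0)
          = (combSums t 1).map (fun s => x + s) := by
        rw [show ((0:Int) + 1) = 0 + 1 from rfl, map_shift 0 (t.length : Int)]
        rw [combSums_one]
        conv_rhs => rw [← PySem.List.map_pyGetD_pyRange_zero t 0, List.map_map]
        refine List.map_congr_left (fun k hk => ?_)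
        have hk0 : 0 ≤ k := (PySem.List.mem_pyRange_one.mp hk).1
        rw [pyGetD_cons_succ x t k hk0, PySem.List.pyGetD_zero_cons]
        rfl
      have tail :
          (PySem.List.pyRange (0 + 1) ((t.length : Int) + 1 - 1)).flatMap (fun j =>
            (PySem.List.pyRange (j + 1) ((t.length : Int) + 1)).map (fun k =>
              PySem.List.pyGetD (x :: t) j 0 + PySem.List.pyGetD (x :: t) k 0))
          = A2 t := by
        have e1 : ((t.length : Int) + 1 - 1) = (t.length : Int) - 1 + 1 := by ring
        rw [show ((0:Int) + 1) = 0 + 1 from rfl, e1, flatMap_shift 0 ((t.length : Int) - 1)]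
        unfold A2
        refine List.flatMap_congr (fun j hj => ?_)
        have hj0 : 0 ≤ j := (PySem.List.mem_pyRange_one.mp hj).1
        rw [show (j + 1 + 1) = (j + 1) + 1 from rfl, map_shift (j + 1) (t.length : Int)]
        refine List.map_congr_left (fun k hk => ?_)
        have hk0 : 0 ≤ k := by
          have := (PySem.List.mem_pyRange_one.mp hk).1; omega
        rw [pyGetD_cons_succ x t j hj0, pyGetD_cons_succ x t k hk0]
      rw [head, tail, ih]
      rfl

theorem A3_eq (xs : List Int) : A3 xs = combSums xs 3 := by
  induction xs with
  | nil => simp [A3, combSums]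
  | cons x t ih =>
    unfold A3
    rcases Nat.lt_or_ge t.length 2 with hm | hm
    · have h1 : ((x :: t).length : Int) - 2 ≤ 0 := by simp; omega
      rw [PySem.List.pyRange_one_eq_nil h1, List.flatMap_nil]
      rw [show combSums (x :: t) 3 = (combSums t 2).map (fun s => x + s) ++ combSums t 3 from rfl]
      rw [combSums_short t 2 hm, combSums_short t 3 (by omega)]
      rfl
    · have hlen : ((x :: t).length : Int) = (t.length : Int) + 1 := by simp
      rw [hlen]
      have h0 : (0 : Int) < (t.length : Int) + 1 - 2 := by omega
      rw [PySem.List.pyRange_one_cons h0, List.flatMap_cons]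
      have head :
          (PySem.List.pyRange (0 + 1) ((t.length : Int) + 1 - 1)).flatMap (fun j =>
            (PySem.List.pyRange (j + 1) ((t.length : Int) + 1)).map (fun k =>
              PySem.List.pyGetD (x :: t) 0 0 + PySem.List.pyGetD (x :: t) j 0 +
                PySem.List.pyGetD (x :: t) k 0))
          = (combSums t 2).map (fun s => x + s) := by
        have e1 : ((t.length : Int) + 1 - 1) = (t.length : Int) - 1 + 1 := by ring
        rw [show ((0:Int) + 1) = 0 + 1 from rfl, e1, flatMap_shift 0 ((t.length : Int) - 1)]
        rw [← A2_eq]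
        unfold A2
        rw [List.map_flatMap]
        refine List.flatMap_congr (fun j hj => ?_)
        have hj0 : 0 ≤ j := (PySem.List.mem_pyRange_one.mp hj).1
        rw [show (j + 1 + 1) = (j + 1) + 1 from rfl, map_shift (j + 1) (t.length : Int),
            List.map_map]
        refine List.map_congr_left (fun k hk => ?_)
        have hk0 : 0 ≤ k := by
          have := (PySem.List.mem_pyRange_one.mp hk).1; omega
        simp only [Function.comp]
        rw [pyGetD_cons_succ x t j hj0, pyGetD_cons_succ x t k hk0,
            PySem.List.pyGetD_zero_cons]
        ring
      have tail :
          (PySem.List.pyRange (0 + 1) ((t.length : Int) + 1 - 2)).flatMap (fun i =>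
            (PySem.List.pyRange (i + 1) ((t.length : Int) + 1 - 1)).flatMap (fun j =>
              (PySem.List.pyRange (j + 1) ((t.length : Int) + 1)).map (fun k =>
                PySem.List.pyGetD (x :: t) i 0 + PySem.List.pyGetD (x :: t) j 0 +
                  PySem.List.pyGetD (x :: t) k 0)))
          = A3 t := by
        have e1 : ((t.length : Int) + 1 - 2) = (t.length : Int) - 2 + 1 := by ring
        have e2 : ((t.length : Int) + 1 - 1) = (t.length : Int) - 1 + 1 := by ring
        rw [show ((0:Int) + 1) = 0 + 1 from rfl, e1, flatMap_shift 0 ((t.length : Int) - 2)]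
        unfold A3
        refine List.flatMap_congr (fun i hi => ?_)
        have hi0 : 0 ≤ i := (PySem.List.mem_pyRange_one.mp hi).1
        rw [show (i + 1 + 1) = (i + 1) + 1 from rfl, e2, flatMap_shift (i + 1) ((t.length : Int) - 1)]
        refine List.flatMap_congr (fun j hj => ?_)
        have hj0 : 0 ≤ j := by
          have := (PySem.List.mem_pyRange_one.mp hj).1; omega
        rw [show (j + 1 + 1) = (j + 1) + 1 from rfl, map_shift (j + 1) (t.length : Int)]
        refine List.map_congr_left (fun k hk => ?_)
        have hk0 : 0 ≤ k := by
          have := (PySem.List.mem_pyRange_one.mp hk).1; omega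
        rw [pyGetD_cons_succ x t i hi0, pyGetD_cons_succ x t j hj0,
            pyGetD_cons_succ x t k hk0]
      rw [head, tail, ih]
      rfl

-- A's nested loops build A3, A's count loop is countP
theorem solution_eq_count (nums : List Int) :
    solution nums = ((A3 nums).countP is_prime_number : Int) := by
  unfold solution A3
  simp only [PySem.List.foldl_append_singleton_eq_map, PySem.List.foldl_append_eq_flatMap,
             PySem.List.foldl_count_if, List.nil_append, zero_add]

-- ===== VERDICT (by name: the statement is the Claim_ definition above) =====
theorem solution_spec : Claim_equal_solution := by
  intro nums _
  unfold Spec_solution solution_alt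
  rw [solution_eq_count, A3_eq]
  congr 1
  exact List.countP_congr (fun x _ => by rw [prime_eq])
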